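-- pv_equiv track=rewrite | github.com/mhattingpete/personal-ai-os | src/pai/executor.py | _convert_to_mcp_args
-- ===== SOURCE A (Python) =====
-- from typing import Any
--
-- def _convert_to_mcp_args(action_type: str, action_data: dict) -> dict[str, Any]:
--     """Convert PAI action data to MCP tool arguments."""
--     # Email actions
--     if action_type == "email.label":
--         return {
--             "message_id": action_data.get("message_id"),
--             "label": action_data.get("label"),
--         }
--     elif action_type == "email.archive":
--         return {
--             "message_id": action_data.get("message_id"),
--         }
--     elif action_type == "email.send":
--         return {
--             "to": action_data.get("to"),
--             "subject": action_data.get("subject"),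
--             "body": action_data.get("body"),
--         }
--
--     # Default: pass through action data (minus type field)
--     return {k: v for k, v in action_data.items() if k != "type"}
-- ===== SOURCE B (Python) =====
-- _TEMPLATES = {
--     "email.label": ("message_id", "label"),
--     "email.archive": ("message_id",),
--     "email.send": ("to", "subject", "body"),
-- }
--
-- def _convert_to_mcp_args(action_type: str, action_data: dict):
--     """Convert PAI action data to MCP tool arguments.
--
--     Single pass over action_data: for known action types a None-seeded
--     template dict is filled in place; otherwise entries are copied
--     through, skipping 'type'.
--     """
--     keys = _TEMPLATES.get(action_type)
--     if keys is None:
--         out = {}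
--         for k, v in action_data.items():
--             if k != "type":
--                 out[k] = v
--         return out
--     out = dict.fromkeys(keys)
--     for k, v in action_data.items():
--         if k in out:
--             out[k] = v
--     return out
-- ===== Notes on version B (the rewrite author's own statement) =====
-- stated objective: alternative
-- what changed: Instead of A's per-output-key dict lookups (one .get per template key), B makes a single pass over action_data, filling a None-pre-seeded template dict in place (and the passthrough case becomes the same scan skipping 'type').
import Mathlib
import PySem

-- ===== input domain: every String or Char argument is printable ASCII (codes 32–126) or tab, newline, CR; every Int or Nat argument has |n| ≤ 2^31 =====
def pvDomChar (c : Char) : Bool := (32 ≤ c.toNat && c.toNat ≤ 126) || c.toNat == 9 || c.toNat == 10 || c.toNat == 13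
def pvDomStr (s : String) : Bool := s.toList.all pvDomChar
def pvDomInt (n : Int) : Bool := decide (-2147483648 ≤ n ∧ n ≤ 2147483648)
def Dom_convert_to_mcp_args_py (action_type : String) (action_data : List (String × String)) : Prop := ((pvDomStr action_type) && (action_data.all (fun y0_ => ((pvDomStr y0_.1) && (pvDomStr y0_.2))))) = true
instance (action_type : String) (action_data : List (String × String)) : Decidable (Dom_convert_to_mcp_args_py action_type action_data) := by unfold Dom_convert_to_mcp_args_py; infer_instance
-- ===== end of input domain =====

-- ===== PORT A =====
-- Header: B fills a None-pre-seeded template dict in one pass over action_data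
-- instead of A's per-output-key lookups (alternative decomposition, same cost).
def convert_to_mcp_args_py (action_type : String) (action_data : List (String × String)) : List (String × Option String) :=
  let d := PySem.Dict.ofList action_data
  if action_type = "email.label" then
    [("message_id", d.get? "message_id"), ("label", d.get? "label")]
  else if action_type = "email.archive" then
    [("message_id", d.get? "message_id")]
  else if action_type = "email.send" then
    [("to", d.get? "to"), ("subject", d.get? "subject"), ("body", d.get? "body")]
  else
    (d.items.filter (fun kv => kv.1 != "type")).map (fun kv => (kv.1, some kv.2))

-- ===== PORT B =====
-- _TEMPLATES: a dict literal mapping action_type to its ordered key tuple.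
def pvTemplates : PySem.Dict String (List String) :=
  PySem.Dict.mk [("email.label", ["message_id", "label"]),
                 ("email.archive", ["message_id"]),
                 ("email.send", ["to", "subject", "body"])]

def convert_to_mcp_args_py_alt (action_type : String) (action_data : List (String × String)) : List (String × Option String) :=
  match pvTemplates.get? action_type with
  | none =>
      -- out = {}; for k, v in action_data.items(): if k != "type": out[k] = v
      (((PySem.Dict.ofList action_data).items.foldl
          (fun (o : PySem.Dict String (Option String)) kv =>
            if kv.1 != "type" then o.insert kv.1 (some kv.2) else o)
          PySem.Dict.empty)).items
  | some keys =>
      -- out = dict.fromkeys(keys); for k, v in action_data.items(): if k in out: out[k] = v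
      let out0 : PySem.Dict String (Option String) :=
        keys.foldl (fun o k => o.insert k none) PySem.Dict.empty
      (((PySem.Dict.ofList action_data).items.foldl
          (fun o kv => if o.contains kv.1 then o.insert kv.1 (some kv.2) else o)
          out0)).items

-- ===== PRECONDITION & SPEC =====
def Spec_convert_to_mcp_args_py (action_type : String) (action_data : List (String × String)) (out : List (String × Option String)) : Prop := out = convert_to_mcp_args_py_alt action_type action_data
instance (action_type : String) (action_data : List (String × String)) (out : List (String × Option String)) : Decidable (Spec_convert_to_mcp_args_py action_type action_data out) := by unfold Spec_convert_to_mcp_args_py; infer_instance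

-- ===== CLAIM (what is proved, stated in full; the proofs are below) =====
def Claim_equal_convert_to_mcp_args_py : Prop := ∀ (action_type : String) (action_data : List (String × String)), Dom_convert_to_mcp_args_py action_type action_data → Spec_convert_to_mcp_args_py action_type action_data (convert_to_mcp_args_py action_type action_data)

-- ===== LEMMAS AND PROOFS =====

-- first-match association lookup (proof helper for characterising B's fill loop)
def pvAssoc (l : List (String × String)) (k : String) : Option String :=
  match l with
  | [] => none
  | (k', v) :: rest => if k' == k then some v else pvAssoc rest k

theorem pvAssoc_eq_none_of_not_mem (l : List (String × String)) (k : String)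
    (h : k ∉ l.map Prod.fst) : pvAssoc l k = none := by
  induction l with
  | nil => rfl
  | cons p rest ih =>
    simp only [List.map_cons, List.mem_cons, not_or] at h
    simp only [pvAssoc]
    rw [if_neg (by simpa [beq_iff_eq] using fun e => h.1 e.symm)]
    exact ih h.2

theorem pvAssoc_some_mem (l : List (String × String)) (k v : String)
    (h : pvAssoc l k = some v) : (k, v) ∈ l := by
  induction l with
  | nil => simp [pvAssoc] at h
  | cons p rest ih =>
    obtain ⟨k', v'⟩ := p
    simp only [pvAssoc] at h
    by_cases hk : (k' == k) = true
    · rw [if_pos hk] at h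
      obtain rfl : k' = k := by simpa [beq_iff_eq] using hk
      obtain rfl : v' = v := by simpa using h
      exact List.mem_cons_self
    · rw [if_neg hk] at h
      exact List.mem_cons_of_mem _ (ih h)

theorem pvAssoc_none_not_mem (l : List (String × String)) (k : String)
    (h : pvAssoc l k = none) : k ∉ l.map Prod.fst := by
  induction l with
  | nil => simp
  | cons p rest ih =>
    obtain ⟨k', v'⟩ := p
    simp only [pvAssoc] at h
    by_cases hk : (k' == k) = true
    · rw [if_pos hk] at h; exact absurd h (by simp)
    · rw [if_neg hk] at h
      have : k' ≠ k := by simpa [beq_iff_eq] using hk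
      simp only [List.map_cons, List.mem_cons, not_or]
      exact ⟨fun e => this e.symm, ih h⟩

-- d.get? agrees with first-match lookup on d.items when keys are unique
theorem pvGet?_eq_assoc (d : PySem.Dict String String) (hn : d.keys.Nodup) (k : String) :
    d.get? k = pvAssoc d.items k := by
  cases h : pvAssoc d.items k with
  | none =>
    rw [PySem.Dict.get?_eq_none_iff_not_mem_keys]
    have := pvAssoc_none_not_mem _ _ h
    simpa [PySem.Dict.keys] using this
  | some v =>
    exact PySem.Dict.get?_of_mem_items d (pvAssoc_some_mem _ _ _ h) hn

-- B's fill loop only overwrites values of existing keys of o, with the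
-- (unique) value that pvAssoc l finds.
theorem pvAssoc_cons (k' v : String) (rest : List (String × String)) (k : String) :
    pvAssoc ((k', v) :: rest) k = if k' == k then some v else pvAssoc rest k := rfl

theorem pvFill (l : List (String × String)) (hn : (l.map Prod.fst).Nodup)
    (o : PySem.Dict String (Option String)) :
    (l.foldl (fun o kv => if o.contains kv.1 then o.insert kv.1 (some kv.2) else o) o).items
      = o.items.map (fun kv => (kv.1, match pvAssoc l kv.1 with | some v => some v | none => kv.2)) := by
  induction l generalizing o with
  | nil =>
    simp [pvAssoc]
  | cons p rest ih =>
    obtain ⟨k, v⟩ := p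
    have hn' : (k :: rest.map Prod.fst).Nodup := by simpa only [List.map_cons] using hn
    have hknotin : k ∉ rest.map Prod.fst := (List.nodup_cons.mp hn').1
    have hrest : (rest.map Prod.fst).Nodup := (List.nodup_cons.mp hn').2
    simp only [List.foldl_cons]
    by_cases hc : o.contains k = true
    · rw [if_pos hc, ih hrest, PySem.Dict.items_insert_of_contains _ _ hc, List.map_map]
      apply List.map_congr_left
      intro p _
      simp only [Function.comp_apply]
      by_cases hp : (p.1 == k) = true
      · rw [if_pos hp]
        obtain rfl : p.1 = k := by simpa [beq_iff_eq] using hp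
        rw [pvAssoc_cons]
        rw [if_pos (beq_self_eq_true p.1)]
        simp [pvAssoc_eq_none_of_not_mem rest p.1 hknotin]
      · rw [if_neg hp]
        have hne : (k == p.1) = false := by
          refine beq_eq_false_iff_ne.mpr ?_
          intro e; exact hp (by simp [e.symm])
        rw [pvAssoc_cons, if_neg (by simp [hne])]
    · rw [if_neg hc, ih hrest]
      apply List.map_congr_left
      intro p hp
      have hmem : p.1 ∈ o.keys := by
        simp only [PySem.Dict.keys]
        exact List.mem_map_of_mem hp
      have hpk : (k == p.1) = false := by
        refine beq_eq_false_iff_ne.mpr ?_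
        intro e
        subst e
        rw [PySem.Dict.contains_iff_mem_keys] at hc
        exact hc hmem
      rw [pvAssoc_cons, if_neg (by simp [hpk])]

-- keys built by the template fold are the template keys with value none
theorem pvOut0_label :
    ((["message_id", "label"] : List String).foldl
        (fun (o : PySem.Dict String (Option String)) k => o.insert k none) PySem.Dict.empty).items
      = [("message_id", (none : Option String)), ("label", none)] := by decide

theorem pvOut0_archive :
    ((["message_id"] : List String).foldl
        (fun (o : PySem.Dict String (Option String)) k => o.insert k none) PySem.Dict.empty).items
      = [("message_id", (none : Option String))] := by decide

theorem pvOut0_send :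
    ((["to", "subject", "body"] : List String).foldl
        (fun (o : PySem.Dict String (Option String)) k => o.insert k none) PySem.Dict.empty).items
      = [("to", (none : Option String)), ("subject", none), ("body", none)] := by decide

-- for a known template, B's result lists the template keys with d.get? values
theorem pvFillTemplate (ad : List (String × String)) (keys : List String)
    (out0items : List (String × Option String))
    (h0 : ((keys.foldl (fun (o : PySem.Dict String (Option String)) k => o.insert k none) PySem.Dict.empty)).items = out0items)
    (hall : ∀ p ∈ out0items, p.2 = (none : Option String)) :
    (((PySem.Dict.ofList ad).items.foldl
        (fun o kv => if o.contains kv.1 then o.insert kv.1 (some kv.2) else o)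
        (keys.foldl (fun (o : PySem.Dict String (Option String)) k => o.insert k none) PySem.Dict.empty))).items
      = out0items.map (fun p => (p.1, (PySem.Dict.ofList ad).get? p.1)) := by
  set d := PySem.Dict.ofList ad with hd
  have hn : d.keys.Nodup := PySem.Dict.nodup_keys_ofList ad
  have hitems : (d.items.map Prod.fst).Nodup := by simpa [PySem.Dict.keys] using hn
  rw [pvFill d.items hitems, h0]
  apply List.map_congr_left
  intro p hp
  rw [hall p hp]
  rw [pvGet?_eq_assoc d hn p.1]
  cases pvAssoc d.items p.1 <;> rfl

-- ===== VERDICT (by name: the statement is the Claim_ definition above) =====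
theorem convert_to_mcp_args_py_spec : Claim_equal_convert_to_mcp_args_py := by
  intro at_ ad _
  show convert_to_mcp_args_py at_ ad = convert_to_mcp_args_py_alt at_ ad
  by_cases h1 : at_ = "email.label"
  · subst h1
    have ht : pvTemplates.get? "email.label" = some ["message_id", "label"] := by decide
    simp only [convert_to_mcp_args_py, convert_to_mcp_args_py_alt, ht]
    rw [pvFillTemplate ad _ _ pvOut0_label (by decide)]
    simp
  · by_cases h2 : at_ = "email.archive"
    · subst h2
      have ht : pvTemplates.get? "email.archive" = some ["message_id"] := by decide
      simp only [convert_to_mcp_args_py, convert_to_mcp_args_py_alt, ht]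
      rw [pvFillTemplate ad _ _ pvOut0_archive (by decide)]
      simp [h1]
    · by_cases h3 : at_ = "email.send"
      · subst h3
        have ht : pvTemplates.get? "email.send" = some ["to", "subject", "body"] := by decide
        simp only [convert_to_mcp_args_py, convert_to_mcp_args_py_alt, ht]
        rw [pvFillTemplate ad _ _ pvOut0_send (by decide)]
        simp [h1, h2]
      · have e1 : ("email.label" == at_) = false := beq_eq_false_iff_ne.mpr (Ne.symm h1)
        have e2 : ("email.archive" == at_) = false := beq_eq_false_iff_ne.mpr (Ne.symm h2)
        have e3 : ("email.send" == at_) = false := beq_eq_false_iff_ne.mpr (Ne.symm h3)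
        have ht : pvTemplates.get? at_ = none := by
          simp [pvTemplates, PySem.Dict.get?, e1, e2, e3]
        simp only [convert_to_mcp_args_py, convert_to_mcp_args_py_alt, ht, if_neg h1, if_neg h2, if_neg h3]
        rw [← List.foldl_filter]
        have hn : ((PySem.Dict.ofList ad).items.filter (fun kv => kv.1 != "type")).map Prod.fst |>.Nodup := by
          have : ((PySem.Dict.ofList ad).items.map Prod.fst).Nodup := by
            simpa [PySem.Dict.keys] using PySem.Dict.nodup_keys_ofList ad
          exact (List.Sublist.map Prod.fst List.filter_sublist).nodup this
        rw [PySem.Dict.items_foldl_insert_fresh _ Prod.fst (fun a => some a.2) PySem.Dict.empty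
              (fun a _ => PySem.Dict.contains_empty _) hn]
        simp [show (PySem.Dict.empty : PySem.Dict String (Option String)).items = [] from rfl]
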